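-- pv_equiv track=rewrite | github.com/EmYassir/adversarial_qa_training | src/utilities/trainer_utils.py | calculate_gen_dis_steps
-- ===== SOURCE A (Python) =====
-- def calculate_gen_dis_steps(max_steps, num_dis_rounds, num_gen_rounds):
--     if max_steps <= 0 or  num_dis_rounds <= 0 or  num_gen_rounds <= 0:
--         return 0, 0
--     d, g = 0, 0
--     rounds, cumulated_rounds = 0, num_dis_rounds + num_gen_rounds
--     for _ in range(max_steps):
--         if rounds < num_dis_rounds:
--             d += 1
--             rounds += 1
--         elif rounds < cumulated_rounds:
--             g += 1
--             rounds += 1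
--         else:
--             d += 1
--             rounds = 1
--     return d, g
-- ===== SOURCE B (Python) =====
-- def calculate_gen_dis_steps(max_steps, num_dis_rounds, num_gen_rounds):
--     if max_steps <= 0 or num_dis_rounds <= 0 or num_gen_rounds <= 0:
--         return 0, 0
--     cycle = num_dis_rounds + num_gen_rounds
--     q, r = divmod(max_steps, cycle)
--     d = q * num_dis_rounds + min(r, num_dis_rounds)
--     return d, max_steps - d
-- ===== Notes on version B (the rewrite author's own statement) =====
-- stated objective: faster
-- what changed: Replaced the per-step simulation loop over range(max_steps) with closed-form divmod arithmetic: complete cycles times num_dis_rounds plus a clamped remainder.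
import Mathlib
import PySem

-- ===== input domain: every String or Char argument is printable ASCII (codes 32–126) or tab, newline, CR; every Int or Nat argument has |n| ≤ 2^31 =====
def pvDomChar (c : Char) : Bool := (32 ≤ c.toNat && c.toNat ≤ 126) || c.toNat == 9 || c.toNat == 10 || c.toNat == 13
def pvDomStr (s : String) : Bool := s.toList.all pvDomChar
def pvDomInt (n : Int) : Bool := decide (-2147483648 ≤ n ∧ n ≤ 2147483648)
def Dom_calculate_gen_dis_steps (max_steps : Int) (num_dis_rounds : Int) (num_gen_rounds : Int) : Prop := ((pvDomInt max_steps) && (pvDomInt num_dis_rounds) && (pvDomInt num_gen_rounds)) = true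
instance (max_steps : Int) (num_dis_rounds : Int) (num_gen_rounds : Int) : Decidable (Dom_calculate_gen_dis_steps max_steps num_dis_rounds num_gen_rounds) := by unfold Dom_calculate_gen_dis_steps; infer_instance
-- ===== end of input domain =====

-- B replaces A's per-step simulation loop with closed-form divmod arithmetic (objective: faster).

-- ===== PORT A =====
-- one iteration of A's for-loop body on the state (d, g, rounds)
def pvStepA (num_dis_rounds cumulated_rounds : Int) : Int × Int × Int → Int × Int × Int
  | (d, g, rounds) =>
    if rounds < num_dis_rounds then (d + 1, g, rounds + 1)
    else if rounds < cumulated_rounds then (d, g + 1, rounds + 1)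
    else (d + 1, g, 1)

-- 'for _ in range(max_steps)': apply the body max_steps times
def pvLoopA (num_dis_rounds cumulated_rounds : Int) : Nat → (Int × Int × Int) → Int × Int × Int
  | 0, s => s
  | n + 1, s => pvStepA num_dis_rounds cumulated_rounds (pvLoopA num_dis_rounds cumulated_rounds n s)

def calculate_gen_dis_steps (max_steps : Int) (num_dis_rounds : Int) (num_gen_rounds : Int) : Int × Int :=
  if max_steps ≤ 0 ∨ num_dis_rounds ≤ 0 ∨ num_gen_rounds ≤ 0 then (0, 0)
  else
    let cumulated_rounds := num_dis_rounds + num_gen_rounds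
    let s := pvLoopA num_dis_rounds cumulated_rounds max_steps.toNat (0, 0, 0)
    (s.1, s.2.1)

-- ===== PORT B =====
def calculate_gen_dis_steps_alt (max_steps : Int) (num_dis_rounds : Int) (num_gen_rounds : Int) : Int × Int :=
  if max_steps ≤ 0 ∨ num_dis_rounds ≤ 0 ∨ num_gen_rounds ≤ 0 then (0, 0)
  else
    let cycle := num_dis_rounds + num_gen_rounds
    let q := PySem.Int.floordiv max_steps cycle
    let r := PySem.Int.mod max_steps cycle
    let d := q * num_dis_rounds + min r num_dis_rounds
    (d, max_steps - d)

-- ===== PRECONDITION & SPEC =====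
def Spec_calculate_gen_dis_steps (max_steps : Int) (num_dis_rounds : Int) (num_gen_rounds : Int) (out : Int × Int) : Prop := out = calculate_gen_dis_steps_alt max_steps num_dis_rounds num_gen_rounds
instance (max_steps : Int) (num_dis_rounds : Int) (num_gen_rounds : Int) (out : Int × Int) : Decidable (Spec_calculate_gen_dis_steps max_steps num_dis_rounds num_gen_rounds out) := by unfold Spec_calculate_gen_dis_steps; infer_instance

-- ===== CLAIM (what is proved, stated in full; the proofs are below) =====
def Claim_equal_calculate_gen_dis_steps : Prop := ∀ (max_steps : Int) (num_dis_rounds : Int) (num_gen_rounds : Int), Dom_calculate_gen_dis_steps max_steps num_dis_rounds num_gen_rounds → Spec_calculate_gen_dis_steps max_steps num_dis_rounds num_gen_rounds (calculate_gen_dis_steps max_steps num_dis_rounds num_gen_rounds)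

-- ===== LEMMAS AND PROOFS =====

-- closed form for the state after n iterations of A's loop, starting from (0, 0, 0):
-- d = (n / C) * D + min (n % C) D, g = n - d, and rounds = 0 for n = 0, else the
-- representative of n in (0, C] (C when C divides n, n % C otherwise), where C = D + G.
lemma pvLoopA_closed (D G : Int) (hD : 0 < D) (hG : 0 < G) (n : Nat) :
    pvLoopA D (D + G) n (0, 0, 0) =
      ((n : Int) / (D + G) * D + min ((n : Int) % (D + G)) D,
       (n : Int) - ((n : Int) / (D + G) * D + min ((n : Int) % (D + G)) D),
       if n = 0 then 0 else if (n : Int) % (D + G) = 0 then D + G else (n : Int) % (D + G)) := by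
  have hC : 0 < D + G := by omega
  induction n with
  | zero =>
      simp [pvLoopA]
      omega
  | succ n ih =>
      rw [pvLoopA, ih]
      have hq : (n : Int) / (D + G) = (n : Int) / (D + G) := rfl
      have h1 : (n : Int) % (D + G) + (D + G) * ((n : Int) / (D + G)) = (n : Int) :=
        Int.emod_add_mul_ediv _ _
      have hr0 : 0 ≤ (n : Int) % (D + G) := Int.emod_nonneg _ (by omega)
      have hrC : (n : Int) % (D + G) < D + G := Int.emod_lt_of_pos _ hC
      generalize hqv : (n : Int) / (D + G) = q at *
      generalize hrv : (n : Int) % (D + G) = r at *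
      by_cases hwrap : r + 1 = D + G
      · -- remainder wraps around: quotient increments, remainder becomes 0
        have hqr' : ((n : Int) + 1) / (D + G) = q + 1 ∧ ((n : Int) + 1) % (D + G) = 0 :=
          (Int.ediv_emod_unique hC).mpr ⟨by linear_combination h1 - hwrap, le_refl 0, hC⟩
        have hn0 : ¬ (n = 0) := by
          intro h; subst h; simp at hrv; omega
        have hrne : ¬ (r = 0) := by omega
        have hrD : ¬ (r < D) := by omega
        rw [if_neg hn0, if_neg hrne]
        simp only [pvStepA, if_neg hrD, if_pos hrC, Nat.cast_succ, hqr'.1, hqr'.2,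
          if_neg (Nat.succ_ne_zero n), if_true]
        have hminr : min r D = D := min_eq_right (by omega)
        have hmin0 : min (0 : Int) D = 0 := min_eq_left (by omega)
        rw [hminr, hmin0, (by ring : (q + 1) * D = q * D + D)]
        simp only [Prod.mk.injEq]
        refine ⟨?_, ?_, ?_⟩ <;> first | trivial | linarith
      · -- no wrap: quotient unchanged, remainder increments
        have hqr' : ((n : Int) + 1) / (D + G) = q ∧ ((n : Int) + 1) % (D + G) = r + 1 :=
          (Int.ediv_emod_unique hC).mpr ⟨by linear_combination h1, by omega, by omega⟩
        simp only [pvStepA, Nat.cast_succ, hqr'.1, hqr'.2,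
          if_neg (Nat.succ_ne_zero n), if_neg (by omega : ¬ (r + 1 = 0))]
        by_cases hn0 : n = 0
        · -- first iteration: rounds = 0 < D, discriminator branch
          subst hn0
          simp only [Nat.cast_zero, Int.zero_ediv, Int.zero_emod] at hqv hrv
          subst hqv; subst hrv
          have hmin1 : min (1 : Int) D = 1 := min_eq_left (by omega)
          norm_num [hmin1]
          all_goals try rw [if_pos hD]
          all_goals try norm_num
          all_goals omega
        · rw [if_neg hn0]
          by_cases hr0' : r = 0
          · -- rounds = D + G: reset branch of A
            subst hr0'
            rw [if_pos rfl]
            rw [if_neg (by omega : ¬ ((D + G : Int) < D)), if_neg (by omega : ¬ ((D + G : Int) < D + G))]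
            have hmin0 : min (0 : Int) D = 0 := min_eq_left (by omega)
            have hmin1 : min (0 + 1 : Int) D = 1 := min_eq_left (by omega)
            rw [hmin0, hmin1]
            simp only [Prod.mk.injEq]
            refine ⟨?_, ?_, ?_⟩ <;> first | trivial | linarith
          · rw [if_neg hr0']
            by_cases hrD : r < D
            · -- discriminator branch
              rw [if_pos hrD]
              have hminr : min r D = r := min_eq_left (by omega)
              have hminr1 : min (r + 1) D = r + 1 := min_eq_left (by omega)
              rw [hminr, hminr1]
              simp only [Prod.mk.injEq]
              refine ⟨?_, ?_, ?_⟩ <;> first | trivial | linarith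
            · -- generator branch
              rw [if_neg hrD, if_pos (by omega : r < D + G)]
              have hminr : min r D = D := min_eq_right (by omega)
              have hminr1 : min (r + 1) D = D := min_eq_right (by omega)
              rw [hminr, hminr1]
              simp only [Prod.mk.injEq]
              refine ⟨?_, ?_, ?_⟩ <;> first | trivial | linarith

-- ===== VERDICT (by name: the statement is the Claim_ definition above) =====
theorem calculate_gen_dis_steps_spec : Claim_equal_calculate_gen_dis_steps := by
  intro m D G _
  unfold Spec_calculate_gen_dis_steps calculate_gen_dis_steps calculate_gen_dis_steps_alt
  by_cases hguard : m ≤ 0 ∨ D ≤ 0 ∨ G ≤ 0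
  · rw [if_pos hguard, if_pos hguard]
  · rw [if_neg hguard, if_neg hguard]
    rw [not_or, not_or] at hguard
    obtain ⟨hm, hD, hG⟩ := hguard
    have hm : (0 : Int) < m := by omega
    have hD : (0 : Int) < D := by omega
    have hG : (0 : Int) < G := by omega
    have hC : (0 : Int) < D + G := by omega
    have hcast : ((m.toNat : Int)) = m := Int.toNat_of_nonneg (by omega)
    dsimp only
    rw [pvLoopA_closed D G hD hG m.toNat]
    simp only [hcast]
    rw [PySem.Int.floordiv_eq_ediv_of_pos hC, PySem.Int.mod_eq_emod_of_pos hC]
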